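-- pv_equiv track=rewrite | github.com/mtrev008/NineMenInATrench_Puzzle | CS205_Project_1.py | generate_all_moves
-- ===== SOURCE A (Python) =====
-- import copy
--
-- def find_moves(state):
--     # Valid soldiers contains a list of all valid soldiers to move each entry will be a list of x,y
--     valid_soldiers = []
--
--     for i in range(len(state)):
--         for j in range(len(state[i])):
--             # Move soldier as far as empty spaces exist
--             if state[i][j] > 0:
--                 up = i - 1
--                 while up >= 0 and state[up][j] == 0:
--                     up -= 1
--                 if up + 1 != i:
--                     valid_soldiers.append([i, j, up + 1, j])
--
--                 down = i + 1
--                 while down < len(state) and state[down][j] == 0: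
--                     down += 1
--                 if down - 1 != i:
--                     valid_soldiers.append([i, j, down - 1, j])
--
--                 left = j - 1
--                 while left >= 0 and state[i][left] == 0:
--                     left -= 1
--                 if left + 1 != j:
--                     valid_soldiers.append([i, j, i, left + 1])
--
--                 right = j + 1
--                 while right < len(state[i]) and state[i][right] == 0:
--                     right += 1
--                 if right - 1 != j:
--                     valid_soldiers.append([i, j, i, right - 1])
--
--     return valid_soldiers
--
-- def generate_all_moves(state_value):
--     # Returns all possible valid states
--     valid_moves = find_moves(state_value)
--     state_list = []
--     for move in valid_moves:
--         i = move[0]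
--         j = move[1]
--         new_i = move[2]
--         new_j = move[3]
--         new_state = copy.deepcopy(state_value)
--         new_state[new_i][new_j] = new_state[i][j]
--         new_state[i][j] = 0
--         state_list.append(new_state)
--     return state_list
-- ===== SOURCE B (Python) =====
-- def generate_all_moves(state_value):
--     # Gap-based: per line, list the occupied indices, read each soldier's landing
--     # cells off the neighbouring occupied pairs (stored in dicts), then emit the
--     # successor grids with a single comprehension in the original order.
--     n = len(state_value)
--     width = 0
--     for r in state_value:
--         if len(r) > width:
--             width = len(r)
--     up, down, left, right = {}, {}, {}, {}
--     for j in range(width):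
--         occ = [i for i in range(n)
--                if j >= len(state_value[i]) or state_value[i][j] != 0]
--         pad = [-1] + occ + [n]
--         for a, b in zip(pad, pad[1:]):
--             if a >= 0:
--                 down[(a, j)] = b - 1
--             if b < n:
--                 up[(b, j)] = a + 1
--     for i in range(n):
--         row = state_value[i]
--         w = len(row)
--         occ = [j for j in range(w) if row[j] != 0]
--         pad = [-1] + occ + [w]
--         for a, b in zip(pad, pad[1:]):
--             if a >= 0:
--                 right[(i, a)] = b - 1
--             if b < w:
--                 left[(i, b)] = a + 1
--
--     def succ(i, j, ni, nj):
--         v = state_value[i][j]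
--         return [[0 if (r, c) == (i, j) else (v if (r, c) == (ni, nj) else x)
--                  for c, x in enumerate(row)] for r, row in enumerate(state_value)]
--
--     return [succ(i, j, ni, nj)
--             for i in range(n)
--             for j in range(len(state_value[i])) if state_value[i][j] > 0
--             for ni, nj in [(up[(i, j)], j), (down[(i, j)], j),
--                            (i, left[(i, j)]), (i, right[(i, j)])]
--             if (ni, nj) != (i, j)]
-- ===== Notes on version B (the rewrite author's own statement) =====
-- stated objective: alternative
-- what changed: Instead of sliding each soldier with four while-loops over grid cells, B lists per line the occupied indices once, reads every landing cell off adjacent occupied pairs (gap endpoints) stored in four dictionaries, and emits the successor grids (rebuilt positionally with enumerate instead of in-place assignment on a deep copy) in one comprehension in the original order.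
import Mathlib
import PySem

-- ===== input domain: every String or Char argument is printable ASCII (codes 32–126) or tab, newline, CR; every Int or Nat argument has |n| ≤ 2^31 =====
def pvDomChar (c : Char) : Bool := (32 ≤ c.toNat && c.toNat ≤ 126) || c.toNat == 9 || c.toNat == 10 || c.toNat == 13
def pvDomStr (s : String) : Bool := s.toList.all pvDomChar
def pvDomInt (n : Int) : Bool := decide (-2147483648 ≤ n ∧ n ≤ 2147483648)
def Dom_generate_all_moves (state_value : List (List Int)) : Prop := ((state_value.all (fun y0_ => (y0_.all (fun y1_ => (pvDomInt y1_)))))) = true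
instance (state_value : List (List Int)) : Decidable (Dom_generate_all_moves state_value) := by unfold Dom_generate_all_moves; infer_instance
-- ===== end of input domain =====

-- B replaces A's per-soldier sliding while-loops by per-line occupied-index lists whose
-- adjacent pairs give every landing cell (stored in four dicts), and rebuilds successor
-- grids positionally; objective: an alternative, genuinely different algorithm.

-- ===== PORT A =====
-- while up >= 0 and state[up][j] = 0: up -= 1   (started at up = i-1; the Nat argument is up+1)
-- state[up][j] is ported as getD with default 0; Pre_ excludes the inputs where that access raises IndexError
def whileUpA (st : List (List Int)) (j : Nat) : Nat → Int
  | 0 => -1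
  | k+1 => if (st.getD k []).getD j 0 = 0 then whileUpA st j k else (k : Int)

-- while down < len(state) and state[down][j] = 0: down += 1
def whileDownA (st : List (List Int)) (j : Nat) (d : Nat) : Int :=
  if d < st.length then
    (if (st.getD d []).getD j 0 = 0 then whileDownA st j (d+1) else (d : Int))
  else (d : Int)
termination_by st.length - d
decreasing_by omega

-- while left >= 0 and state[i][left] = 0: left -= 1   (Nat argument is left+1)
def whileLeftA (row : List Int) : Nat → Int
  | 0 => -1
  | k+1 => if row.getD k 0 = 0 then whileLeftA row k else (k : Int)

-- while right < len(state[i]) and state[i][right] = 0: right += 1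
def whileRightA (row : List Int) (r : Nat) : Int :=
  if r < row.length then
    (if row.getD r 0 = 0 then whileRightA row (r+1) else (r : Int))
  else (r : Int)
termination_by row.length - r
decreasing_by omega

def find_movesA (st : List (List Int)) : List (List Int) :=
  (List.range st.length).foldl (fun acc i =>
    (List.range (st.getD i []).length).foldl (fun acc j =>
      if 0 < (st.getD i []).getD j 0 then
        let u := whileUpA st j i
        let acc := if u + 1 ≠ (i : Int) then acc ++ [[(i : Int), (j : Int), u + 1, (j : Int)]] else acc
        let d := whileDownA st j (i+1)
        let acc := if d - 1 ≠ (i : Int) then acc ++ [[(i : Int), (j : Int), d - 1, (j : Int)]] else acc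
        let l := whileLeftA (st.getD i []) j
        let acc := if l + 1 ≠ (j : Int) then acc ++ [[(i : Int), (j : Int), (i : Int), l + 1]] else acc
        let r := whileRightA (st.getD i []) (j+1)
        if r - 1 ≠ (j : Int) then acc ++ [[(i : Int), (j : Int), (i : Int), r - 1]] else acc
      else acc) acc) []

-- new_state = deepcopy; new_state[new_i][new_j] = new_state[i][j]; new_state[i][j] = 0
-- every index produced by find_moves is ≥ 0 and in range, so .toNat / set is exact here
def applyMoveA (st : List (List Int)) (mv : List Int) : List (List Int) :=
  let i := (mv.getD 0 0).toNat
  let j := (mv.getD 1 0).toNat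
  let ni := (mv.getD 2 0).toNat
  let nj := (mv.getD 3 0).toNat
  let v := (st.getD i []).getD j 0
  (st.modify ni (fun r => r.set nj v)).modify i (fun r => r.set j 0)

def generate_all_moves (state_value : List (List Int)) : List (List (List Int)) :=
  (find_movesA state_value).foldl (fun acc mv => acc ++ [applyMoveA state_value mv]) []

-- ===== PORT B =====
def widthB (st : List (List Int)) : Nat :=
  st.foldl (fun w r => if w < r.length then r.length else w) 0

-- _gaps(n, blocked): adjacent pairs of [-1] + occupied indices + [n]  (pad[1:] = tail)
def gapsB (n : Nat) (blocked : Nat → Bool) : List (Int × Int) :=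
  let occ : List Int := ((List.range n).filter blocked).map (fun x => Int.ofNat x)
  let pad : List Int := -1 :: occ ++ [(n : Int)]
  pad.zip pad.tail

-- the up/down dicts built column by column (down inserted first, as in the Python)
def vertDictsB (st : List (List Int)) :
    PySem.Dict (Int × Int) Int × PySem.Dict (Int × Int) Int :=
  (List.range (widthB st)).foldl (fun ud j =>
    (gapsB st.length (fun i =>
        decide ((st.getD i []).length ≤ j) || decide ((st.getD i []).getD j 0 ≠ 0))).foldl
      (fun ud p =>
        let dn := if 0 ≤ p.1 then ud.2.insert (p.1, (j : Int)) (p.2 - 1) else ud.2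
        let up := if p.2 < (st.length : Int) then ud.1.insert (p.2, (j : Int)) (p.1 + 1) else ud.1
        (up, dn)) ud)
    (PySem.Dict.empty, PySem.Dict.empty)

-- the left/right dicts built row by row
def horizDictsB (st : List (List Int)) :
    PySem.Dict (Int × Int) Int × PySem.Dict (Int × Int) Int :=
  (List.range st.length).foldl (fun lr i =>
    let row := st.getD i []
    (gapsB row.length (fun j => decide (row.getD j 0 ≠ 0))).foldl
      (fun lr p =>
        let rt := if 0 ≤ p.1 then lr.2.insert ((i : Int), p.1) (p.2 - 1) else lr.2
        let lf := if p.2 < (row.length : Int) then lr.1.insert ((i : Int), p.2) (p.1 + 1) else lr.1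
        (lf, rt)) lr)
    (PySem.Dict.empty, PySem.Dict.empty)

-- succ: rebuild the grid positionally with enumerate (0 at (i,j) first, v at (ni,nj))
def succB (st : List (List Int)) (i j : Nat) (ni nj : Int) : List (List Int) :=
  let v := (st.getD i []).getD j 0
  st.mapIdx (fun r row => row.mapIdx (fun c x =>
    if r = i ∧ c = j then 0 else if (r : Int) = ni ∧ (c : Int) = nj then v else x))

-- dict lookups up[(i,j)] … always hit an existing key for a soldier; getD 0 is exact there
def generate_all_moves_alt (state_value : List (List Int)) : List (List (List Int)) :=
  let ud := vertDictsB state_value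
  let lr := horizDictsB state_value
  (List.range state_value.length).flatMap (fun i =>
    (List.range (state_value.getD i []).length).flatMap (fun j =>
      if 0 < (state_value.getD i []).getD j 0 then
        (([(ud.1.getD ((i : Int), (j : Int)) 0, (j : Int)),
           (ud.2.getD ((i : Int), (j : Int)) 0, (j : Int)),
           ((i : Int), lr.1.getD ((i : Int), (j : Int)) 0),
           ((i : Int), lr.2.getD ((i : Int), (j : Int)) 0)].filter
             (fun p => p != ((i : Int), (j : Int)))).map
           (fun p => succB state_value i j p.1 p.2))
      else []))

-- ===== PRECONDITION & SPEC =====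
-- Pre_ excludes exactly the inputs on which A raises IndexError: a soldier whose vertical
-- sliding scan (through empty, present cells) reaches a row shorter than its column.
def Pre_generate_all_moves (state_value : List (List Int)) : Prop :=
  ∀ i ∈ List.range state_value.length, ∀ j ∈ List.range (state_value.getD i []).length,
    0 < (state_value.getD i []).getD j 0 →
    ∀ k ∈ List.range state_value.length,
      ((k < i ∧ ∀ m ∈ List.range i, k < m → j < (state_value.getD m []).length ∧ (state_value.getD m []).getD j 0 = 0) ∨
       (i < k ∧ ∀ m ∈ List.range k, i < m → j < (state_value.getD m []).length ∧ (state_value.getD m []).getD j 0 = 0)) →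
      j < (state_value.getD k []).length
instance (state_value : List (List Int)) : Decidable (Pre_generate_all_moves state_value) := by
  unfold Pre_generate_all_moves; infer_instance

def pvWitness_generate_all_moves : List (List Int) := [[1, 0], [0, 2]]

def Spec_generate_all_moves (state_value : List (List Int)) (out : List (List (List Int))) : Prop :=
  out = generate_all_moves_alt state_value
instance (state_value : List (List Int)) (out : List (List (List Int))) : Decidable (Spec_generate_all_moves state_value out) := by
  unfold Spec_generate_all_moves; infer_instance

-- ===== CLAIM (what is proved, stated in full; the proofs are below) =====
def Claim_equal_generate_all_moves : Prop := ∀ (state_value : List (List Int)), Dom_generate_all_moves state_value → Pre_generate_all_moves state_value → Spec_generate_all_moves state_value (generate_all_moves state_value)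

-- ===== LEMMAS AND PROOFS =====

-- ---------- A-side flattening ----------

-- a foldl that appends a block per element is a flatMap
lemma foldl_flat {α β : Type} (l : List α) (f : List β → α → List β) (g : α → List β)
    (h : ∀ acc x, x ∈ l → f acc x = acc ++ g x) (acc0 : List β) :
    l.foldl f acc0 = acc0 ++ l.flatMap g := by
  rw [PySem.List.foldl_congr_mem l f (fun acc x => acc ++ g x) acc0 h,
      PySem.List.foldl_append_eq_flatMap]

-- per-cell move blocks of A
def cellA (st : List (List Int)) (i j : Nat) : List (List Int) :=
  if 0 < (st.getD i []).getD j 0 then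
    (if whileUpA st j i + 1 ≠ (i : Int) then [[(i : Int), (j : Int), whileUpA st j i + 1, (j : Int)]] else []) ++
    (if whileDownA st j (i+1) - 1 ≠ (i : Int) then [[(i : Int), (j : Int), whileDownA st j (i+1) - 1, (j : Int)]] else []) ++
    (if whileLeftA (st.getD i []) j + 1 ≠ (j : Int) then [[(i : Int), (j : Int), (i : Int), whileLeftA (st.getD i []) j + 1]] else []) ++
    (if whileRightA (st.getD i []) (j+1) - 1 ≠ (j : Int) then [[(i : Int), (j : Int), (i : Int), whileRightA (st.getD i []) (j+1) - 1]] else [])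
  else []

lemma find_movesA_flat (st : List (List Int)) :
    find_movesA st = (List.range st.length).flatMap (fun i =>
      (List.range (st.getD i []).length).flatMap (fun j => cellA st i j)) := by
  unfold find_movesA
  refine (foldl_flat _ _ _ ?_ []).trans (List.nil_append _)
  intro acc i _
  dsimp only
  refine foldl_flat _ _ _ ?_ acc
  intro acc' j _
  unfold cellA
  split_ifs <;> simp [List.append_assoc]

-- ---------- while loops from gap endpoints ----------

lemma whileUp_pair (st : List (List Int)) (j : Nat) :
    ∀ (i : Nat) (a : Int), a < (i : Int) →
    (a = -1 ∨ (0 ≤ a ∧ (st.getD a.toNat []).getD j 0 ≠ 0)) →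
    (∀ m : Nat, a < (m : Int) → (m : Int) < (i : Int) → (st.getD m []).getD j 0 = 0) →
    whileUpA st j i = a
  | 0, a, ha, hcls, _ => by
    rcases hcls with h | ⟨h0, _⟩
    · simp [whileUpA, h]
    · exfalso; omega
  | i+1, a, ha, hcls, hgap => by
    by_cases hai : a = (i : Int)
    · have hnz : (st.getD i []).getD j 0 ≠ 0 := by
        rcases hcls with h | ⟨h0, hnz⟩
        · omega
        · have ht : a.toNat = i := by omega
          rwa [ht] at hnz
      rw [whileUpA, if_neg hnz, hai]
    · have hlt : a < (i : Int) := by omega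
      have hz : (st.getD i []).getD j 0 = 0 := hgap i hlt (by exact_mod_cast Nat.lt_succ_self i)
      rw [whileUpA, if_pos hz]
      exact whileUp_pair st j i a hlt hcls (fun m h1 h2 => hgap m h1 (by omega))

lemma whileDown_pair (st : List (List Int)) (j : Nat) :
    ∀ (t d : Nat), st.length - d ≤ t → ∀ (b : Int), (d : Int) ≤ b → b ≤ (st.length : Int) →
    (b = (st.length : Int) ∨ (0 ≤ b ∧ b.toNat < st.length ∧ (st.getD b.toNat []).getD j 0 ≠ 0)) →
    (∀ m : Nat, (d : Int) ≤ (m : Int) → (m : Int) < b → (st.getD m []).getD j 0 = 0) →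
    whileDownA st j d = b := by
  intro t
  induction t with
  | zero =>
    intro d ht b hdb hbl _ _
    rw [whileDownA.eq_def, if_neg (by omega)]
    omega
  | succ t ih =>
    intro d ht b hdb hbl hcls hgap
    by_cases hbd : (d : Int) = b
    · rcases hcls with h | ⟨h0, hlt, hnz⟩
      · rw [whileDownA.eq_def, if_neg (by omega)]; omega
      · have hdn : d < st.length := by omega
        have htn : b.toNat = d := by omega
        rw [htn] at hnz
        rw [whileDownA.eq_def, if_pos hdn, if_neg hnz]
        exact hbd
    · have hdb' : (d : Int) < b := by omega
      have hdn : d < st.length := by omega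
      have hz : (st.getD d []).getD j 0 = 0 := hgap d (by omega) hdb'
      rw [whileDownA.eq_def, if_pos hdn, if_pos hz]
      exact ih (d+1) (by omega) b (by omega) hbl hcls (fun m h1 h2 => hgap m (by omega) h2)

lemma whileLeft_pair (row : List Int) :
    ∀ (i : Nat) (a : Int), a < (i : Int) →
    (a = -1 ∨ (0 ≤ a ∧ row.getD a.toNat 0 ≠ 0)) →
    (∀ m : Nat, a < (m : Int) → (m : Int) < (i : Int) → row.getD m 0 = 0) →
    whileLeftA row i = a
  | 0, a, ha, hcls, _ => by
    rcases hcls with h | ⟨h0, _⟩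
    · simp [whileLeftA, h]
    · exfalso; omega
  | i+1, a, ha, hcls, hgap => by
    by_cases hai : a = (i : Int)
    · have hnz : row.getD i 0 ≠ 0 := by
        rcases hcls with h | ⟨h0, hnz⟩
        · omega
        · have ht : a.toNat = i := by omega
          rwa [ht] at hnz
      rw [whileLeftA, if_neg hnz, hai]
    · have hlt : a < (i : Int) := by omega
      have hz : row.getD i 0 = 0 := hgap i hlt (by exact_mod_cast Nat.lt_succ_self i)
      rw [whileLeftA, if_pos hz]
      exact whileLeft_pair row i a hlt hcls (fun m h1 h2 => hgap m h1 (by omega))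

lemma whileRight_pair (row : List Int) :
    ∀ (t d : Nat), row.length - d ≤ t → ∀ (b : Int), (d : Int) ≤ b → b ≤ (row.length : Int) →
    (b = (row.length : Int) ∨ (0 ≤ b ∧ b.toNat < row.length ∧ row.getD b.toNat 0 ≠ 0)) →
    (∀ m : Nat, (d : Int) ≤ (m : Int) → (m : Int) < b → row.getD m 0 = 0) →
    whileRightA row d = b := by
  intro t
  induction t with
  | zero =>
    intro d ht b hdb hbl _ _
    rw [whileRightA.eq_def, if_neg (by omega)]
    omega
  | succ t ih =>
    intro d ht b hdb hbl hcls hgap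
    by_cases hbd : (d : Int) = b
    · rcases hcls with h | ⟨h0, hlt, hnz⟩
      · rw [whileRightA.eq_def, if_neg (by omega)]; omega
      · have hdn : d < row.length := by omega
        have htn : b.toNat = d := by omega
        rw [htn] at hnz
        rw [whileRightA.eq_def, if_pos hdn, if_neg hnz]
        exact hbd
    · have hdb' : (d : Int) < b := by omega
      have hdn : d < row.length := by omega
      have hz : row.getD d 0 = 0 := hgap d (by omega) hdb'
      rw [whileRightA.eq_def, if_pos hdn, if_pos hz]
      exact ih (d+1) (by omega) b (by omega) hbl hcls (fun m h1 h2 => hgap m (by omega) h2)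

-- ---------- structure of the gap list ----------

lemma gaps_around (n : Nat) (P : Nat → Bool) (i : Nat) (hi : i < n) (hP : P i = true) :
    ∃ a b : Int,
      (a, (i : Int)) ∈ gapsB n P ∧ ((i : Int), b) ∈ gapsB n P ∧
      a < (i : Int) ∧ (i : Int) < b ∧ b ≤ (n : Int) ∧
      (a = -1 ∨ (0 ≤ a ∧ a.toNat < n ∧ P a.toNat = true)) ∧
      (b = (n : Int) ∨ (0 ≤ b ∧ b.toNat < n ∧ P b.toNat = true)) ∧
      (∀ m : Nat, a < (m : Int) → (m : Int) < (i : Int) → m < n → P m = false) ∧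
      (∀ m : Nat, (i : Int) < (m : Int) → (m : Int) < b → m < n → P m = false) := by
  classical
  set occ : List Int := ((List.range n).filter P).map (fun x => Int.ofNat x) with hocc
  set pad : List Int := -1 :: occ ++ [(n : Int)] with hpad
  have hgaps : gapsB n P = pad.zip pad.tail := rfl
  have hmem_occ : ∀ x : Int, x ∈ occ ↔ ∃ m : Nat, m < n ∧ P m = true ∧ (m : Int) = x := by
    intro x
    simp [hocc, List.mem_filter, List.mem_range, List.mem_map]
    constructor
    · rintro ⟨m, ⟨hm, hp⟩, he⟩; exact ⟨m, hm, hp, he⟩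
    · rintro ⟨m, hm, hp, he⟩; exact ⟨m, ⟨hm, hp⟩, he⟩
  have hocc_pw : occ.Pairwise (· < ·) := by
    have h0 : ((List.range n).filter P).Pairwise (· < ·) :=
      List.Pairwise.sublist List.filter_sublist List.pairwise_lt_range
    simp only [hocc, List.pairwise_map]
    exact h0.imp (fun {a b} hab => by simp only [Int.ofNat_eq_natCast]; exact_mod_cast hab)
  have hocc_bounds : ∀ x ∈ occ, 0 ≤ x ∧ x < (n : Int) := by
    intro x hx
    obtain ⟨m, hm, _, he⟩ := (hmem_occ x).mp hx
    constructor <;> omega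
  have hpad_pw : pad.Pairwise (· < ·) := by
    rw [hpad]
    refine List.pairwise_cons.mpr ⟨?_, ?_⟩
    · intro x hx
      rcases List.mem_append.mp hx with h | h
      · have := (hocc_bounds x h).1; omega
      · simp at h; omega
    · refine List.pairwise_append.mpr ⟨hocc_pw, by simp, ?_⟩
      intro x hx y hy
      simp at hy; subst hy
      exact (hocc_bounds x hx).2
  have hpadlen : pad.length = occ.length + 2 := by simp [hpad]
  have hpadget : ∀ (t : Nat) (h : t < occ.length), pad[t+1]'(by omega) = occ[t] := by
    intro t h
    simp [hpad, List.getElem_cons_succ, List.getElem_append_left h]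
  have hpadlast : pad[occ.length+1]'(by omega) = (n : Int) := by
    simp [hpad, List.getElem_cons_succ, List.getElem_append_right (le_refl occ.length)]
  have hmono : ∀ (x y : Nat) (hx : x < pad.length) (hy : y < pad.length), pad[x] < pad[y] → x < y := by
    intro x y hx hy hlt
    by_contra h
    push_neg at h
    rcases Nat.lt_or_ge y x with hyx | hxy
    · exact absurd (List.pairwise_iff_getElem.mp hpad_pw y x hy hx hyx) (by omega)
    · have : x = y := by omega
      subst this; omega
  have hmono' : ∀ (x y : Nat) (hx : x < pad.length) (hy : y < pad.length), x < y → pad[x] < pad[y] :=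
    fun x y hx hy h => List.pairwise_iff_getElem.mp hpad_pw x y hx hy h
  have hziplen : (pad.zip pad.tail).length = occ.length + 1 := by
    simp [List.length_zip, List.length_tail, hpadlen]
  have hzipget : ∀ (t : Nat) (h : t < occ.length + 1),
      (pad.zip pad.tail)[t]'(by omega) = (pad[t]'(by omega), pad[t+1]'(by omega)) := by
    intro t h
    simp [List.getElem_zip, List.getElem_tail]
  -- index of i in occ
  have hiocc : (i : Int) ∈ occ := (hmem_occ _).mpr ⟨i, hi, hP, rfl⟩
  obtain ⟨k, hk, hocck⟩ := List.mem_iff_getElem.mp hiocc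
  have hpadk1 : pad[k+1]'(by omega) = (i : Int) := by rw [hpadget k hk, hocck]
  have hclass : ∀ x : Int, x ∈ pad → x = -1 ∨ x ∈ occ ∨ x = (n : Int) := by
    intro x hx
    rw [hpad] at hx
    rcases List.mem_cons.mp hx with h | h
    · exact Or.inl h
    · rcases List.mem_append.mp h with h | h
      · exact Or.inr (Or.inl h)
      · simp at h; exact Or.inr (Or.inr h)
  obtain ⟨a, ha⟩ : ∃ x : Int, pad[k]'(by omega) = x := ⟨_, rfl⟩
  obtain ⟨b, hb⟩ : ∃ x : Int, pad[k+2]'(by omega) = x := ⟨_, rfl⟩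
  have hai : a < (i : Int) := by
    rw [← ha, ← hpadk1]; exact hmono' k (k+1) (by omega) (by omega) (by omega)
  have hib : (i : Int) < b := by
    rw [← hb, ← hpadk1]; exact hmono' (k+1) (k+2) (by omega) (by omega) (by omega)
  refine ⟨a, b, ?_, ?_, hai, hib, ?_, ?_, ?_, ?_, ?_⟩
  · rw [hgaps]
    have h := hzipget k (by omega)
    rw [hpadk1, ha] at h
    exact h ▸ List.getElem_mem _
  · rw [hgaps]
    have h := hzipget (k+1) (by omega)
    rw [hpadk1, hb] at h
    exact h ▸ List.getElem_mem _
  · -- b ≤ n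
    by_cases h : k + 2 = occ.length + 1
    · have : pad[k+2]'(by omega) = pad[occ.length+1]'(by omega) := by congr 1
      rw [hb, hpadlast] at this
      omega
    · have hlt : k + 2 < occ.length + 1 := by omega
      have h2 := hmono' (k+2) (occ.length+1) (by omega) (by omega) (by omega)
      rw [hb, hpadlast] at h2
      omega
  · -- classification of a
    have hamem : a ∈ pad := ha ▸ List.getElem_mem _
    rcases hclass a hamem with h | h | h
    · exact Or.inl h
    · obtain ⟨m, hm, hp, he⟩ := (hmem_occ _).mp h
      right
      refine ⟨by omega, by omega, ?_⟩
      have ht : a.toNat = m := by omega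
      rwa [ht]
    · omega
  · -- classification of b
    have hbmem : b ∈ pad := hb ▸ List.getElem_mem _
    rcases hclass b hbmem with h | h | h
    · omega
    · obtain ⟨m, hm, hp, he⟩ := (hmem_occ _).mp h
      right
      refine ⟨by omega, by omega, ?_⟩
      have ht : b.toNat = m := by omega
      rwa [ht]
    · exact Or.inl h
  · -- gap below
    intro m h1 h2 h3
    by_contra hPm
    rw [Bool.not_eq_false] at hPm
    have hmo : (m : Int) ∈ occ := (hmem_occ _).mpr ⟨m, h3, hPm, rfl⟩
    obtain ⟨t, ht, hocct⟩ := List.mem_iff_getElem.mp hmo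
    have hpt : pad[t+1]'(by omega) = (m : Int) := by rw [hpadget t ht, hocct]
    have h4 : k < t + 1 := hmono k (t+1) (by omega) (by omega) (by rw [hpt, ha]; exact h1)
    have h5 : t + 1 < k + 1 := hmono (t+1) (k+1) (by omega) (by omega) (by rw [hpt, hpadk1]; exact h2)
    omega
  · -- gap above
    intro m h1 h2 h3
    by_contra hPm
    rw [Bool.not_eq_false] at hPm
    have hmo : (m : Int) ∈ occ := (hmem_occ _).mpr ⟨m, h3, hPm, rfl⟩
    obtain ⟨t, ht, hocct⟩ := List.mem_iff_getElem.mp hmo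
    have hpt : pad[t+1]'(by omega) = (m : Int) := by rw [hpadget t ht, hocct]
    have h4 : k + 1 < t + 1 := hmono (k+1) (t+1) (by omega) (by omega) (by rw [hpt, hpadk1]; exact h1)
    have h5 : t + 1 < k + 2 := hmono (t+1) (k+2) (by omega) (by omega) (by rw [hpt, hb]; exact h2)
    omega


-- ---------- dict plumbing and landing lookups ----------

lemma foldl_proj_fst {α β γ : Type} (l : List γ) (f : α × β → γ → α × β) (g : α → γ → α)
    (h : ∀ s c, (f s c).1 = g s.1 c) : ∀ s : α × β, (l.foldl f s).1 = l.foldl g s.1 := by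
  induction l with
  | nil => intro s; rfl
  | cons x t ih => intro s; simpa [h] using ih (f s x)

lemma foldl_proj_snd {α β γ : Type} (l : List γ) (f : α × β → γ → α × β) (g : β → γ → β)
    (h : ∀ s c, (f s c).2 = g s.2 c) : ∀ s : α × β, (l.foldl f s).2 = l.foldl g s.2 := by
  induction l with
  | nil => intro s; rfl
  | cons x t ih => intro s; simpa [h] using ih (f s x)

lemma foldl_ite_insert {κ ν γ : Type} [BEq κ] (l : List γ) (C : γ → Prop) [DecidablePred C]
    (k : γ → κ) (v : γ → ν) :
    ∀ d : PySem.Dict κ ν,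
      l.foldl (fun u p => if C p then u.insert (k p) (v p) else u) d
        = (l.filterMap (fun p => if C p then some (k p, v p) else none)).foldl
            (fun u q => u.insert q.1 q.2) d := by
  induction l with
  | nil => intro d; rfl
  | cons x t ih =>
    intro d
    by_cases h : C x <;> simp [h, ih]

lemma foldl_over_flatMap {α β : Type} (l : List α) (f : α → List β) {δ : Type}
    (g : δ → β → δ) : ∀ d : δ, (l.flatMap f).foldl g d = l.foldl (fun d x => (f x).foldl g d) d := by
  induction l with
  | nil => intro d; rfl
  | cons x t ih => intro d; simp [List.flatMap_cons, List.foldl_append, ih]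

-- the event lists behind the four dicts
def upEvents (st : List (List Int)) : List ((Int × Int) × Int) :=
  (List.range (widthB st)).flatMap (fun j =>
    (gapsB st.length (fun i =>
        decide ((st.getD i []).length ≤ j) || decide ((st.getD i []).getD j 0 ≠ 0))).filterMap
      (fun p => if p.2 < (st.length : Int) then some ((p.2, (j : Int)), p.1 + 1) else none))

def downEvents (st : List (List Int)) : List ((Int × Int) × Int) :=
  (List.range (widthB st)).flatMap (fun j =>
    (gapsB st.length (fun i =>
        decide ((st.getD i []).length ≤ j) || decide ((st.getD i []).getD j 0 ≠ 0))).filterMap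
      (fun p => if 0 ≤ p.1 then some ((p.1, (j : Int)), p.2 - 1) else none))

def leftEvents (st : List (List Int)) : List ((Int × Int) × Int) :=
  (List.range st.length).flatMap (fun i =>
    (gapsB (st.getD i []).length (fun j => decide ((st.getD i []).getD j 0 ≠ 0))).filterMap
      (fun p => if p.2 < ((st.getD i []).length : Int) then some (((i : Int), p.2), p.1 + 1) else none))

def rightEvents (st : List (List Int)) : List ((Int × Int) × Int) :=
  (List.range st.length).flatMap (fun i =>
    (gapsB (st.getD i []).length (fun j => decide ((st.getD i []).getD j 0 ≠ 0))).filterMap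
      (fun p => if 0 ≤ p.1 then some (((i : Int), p.1), p.2 - 1) else none))

lemma zip_tail_map_fst : ∀ (l : List Int) (x : Int),
    (((x :: l)).zip l).map Prod.fst = (x :: l).dropLast := by
  intro l
  induction l with
  | nil => intro x; simp
  | cons y t ih => intro x; simpa using ih y

lemma gaps_keys_snd {κ : Type} (n : Nat) (P : Nat → Bool) (f : Int → κ) :
    (gapsB n P).filterMap (fun p => if p.2 < (n : Int) then some (f p.2) else none)
      = (((List.range n).filter P).map (fun x => Int.ofNat x)).map f := by
  unfold gapsB
  set occ : List Int := ((List.range n).filter P).map (fun x => Int.ofNat x) with hocc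
  set pad : List Int := -1 :: occ ++ [(n : Int)] with hpad
  have h1 : (pad.zip pad.tail).map Prod.snd = pad.tail :=
    List.map_snd_zip (by simp [hpad])
  have h2 : (pad.zip pad.tail).filterMap
        (fun p => if p.2 < (n : Int) then some (f p.2) else none)
      = pad.tail.filterMap (fun x => if x < (n : Int) then some (f x) else none) := by
    conv_rhs => rw [← h1]
    rw [List.filterMap_map]
    rfl
  rw [h2]
  have h3 : pad.tail = occ ++ [(n : Int)] := by rw [hpad]; rfl
  rw [h3, List.filterMap_append]
  have h4 : [( n : Int)].filterMap (fun x => if x < (n : Int) then some (f x) else none) = [] := by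
    simp
  rw [h4, List.append_nil]
  have h5 : ∀ x ∈ occ, (if x < (n : Int) then some (f x) else none) = some (f x) := by
    intro x hx
    rw [hocc] at hx
    simp only [List.mem_map, List.mem_filter, List.mem_range] at hx
    obtain ⟨m, ⟨hm, _⟩, he⟩ := hx
    subst he
    rw [if_pos (show Int.ofNat m < (n : Int) by simp only [Int.ofNat_eq_natCast]; omega)]
  rw [List.filterMap_congr h5]
  simp

lemma gaps_keys_fst {κ : Type} (n : Nat) (P : Nat → Bool) (f : Int → κ) :
    (gapsB n P).filterMap (fun p => if 0 ≤ p.1 then some (f p.1) else none)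
      = (((List.range n).filter P).map (fun x => Int.ofNat x)).map f := by
  unfold gapsB
  set occ : List Int := ((List.range n).filter P).map (fun x => Int.ofNat x) with hocc
  set pad : List Int := -1 :: occ ++ [(n : Int)] with hpad
  have h1 : (pad.zip pad.tail).map Prod.fst = pad.dropLast := by
    have hp2 : pad = -1 :: (occ ++ [(n : Int)]) := by rw [hpad]; rfl
    rw [hp2]
    have ht : (-1 :: (occ ++ [(n : Int)])).tail = occ ++ [(n : Int)] := rfl
    rw [ht, zip_tail_map_fst]
  have h2 : (pad.zip pad.tail).filterMap
        (fun p => if 0 ≤ p.1 then some (f p.1) else none)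
      = pad.dropLast.filterMap (fun x => if 0 ≤ x then some (f x) else none) := by
    conv_rhs => rw [← h1]
    rw [List.filterMap_map]
    rfl
  rw [h2]
  have h3 : pad.dropLast = -1 :: occ := by
    have hp3 : pad = (-1 :: occ) ++ [(n : Int)] := by rw [hpad]
    rw [hp3, List.dropLast_concat]
  rw [h3]
  have h5 : ∀ x ∈ occ, (if (0:Int) ≤ x then some (f x) else none) = some (f x) := by
    intro x hx
    rw [hocc] at hx
    simp only [List.mem_map, List.mem_filter, List.mem_range] at hx
    obtain ⟨m, ⟨hm, _⟩, he⟩ := hx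
    subst he
    rw [if_pos (show (0 : Int) ≤ Int.ofNat m by simp only [Int.ofNat_eq_natCast]; omega)]
  rw [List.filterMap_cons_none (by norm_num), List.filterMap_congr h5]
  simp

lemma occ_nodup (n : Nat) (P : Nat → Bool) :
    (((List.range n).filter P).map (fun x => Int.ofNat x)).Nodup := by
  refine List.Nodup.map ?_ (List.Nodup.filter _ (List.nodup_range))
  intro a b h
  simpa [Int.ofNat_eq_natCast] using h

lemma nodup_tag (L : List Nat) (f : Nat → List (Int × Int)) (tag : (Int × Int) → Int)
    (hn : ∀ j ∈ L, (f j).Nodup) (ht : ∀ j ∈ L, ∀ p ∈ f j, tag p = Int.ofNat j)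
    (hL : L.Pairwise (· < ·)) :
    (L.flatMap f).Nodup := by
  refine List.nodup_flatMap.mpr ⟨hn, ?_⟩
  refine List.Pairwise.imp_of_mem ?_ hL
  intro a b ha hb hab
  intro p hpa hpb
  have t1 := ht a ha p hpa
  have t2 := ht b hb p hpb
  rw [t1] at t2
  simp only [Int.ofNat_eq_natCast] at t2
  omega

lemma upEvents_keys_nodup (st : List (List Int)) : ((upEvents st).map Prod.fst).Nodup := by
  unfold upEvents
  rw [List.map_flatMap]
  refine nodup_tag _ _ Prod.snd ?_ ?_ List.pairwise_lt_range
  · intro j _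
    rw [List.map_filterMap]
    have he : (fun (p : Int × Int) =>
        (if p.2 < (st.length : Int) then some ((p.2, (j : Int)), p.1 + 1) else none).map Prod.fst)
        = fun p => if p.2 < (st.length : Int) then some ((p.2, (j : Int))) else none := by
      funext p; split_ifs <;> rfl
    rw [he, gaps_keys_snd (f := fun x => (x, (j : Int)))]
    exact List.Nodup.map (fun a b h => (Prod.mk.injEq _ _ _ _).mp h |>.1) (occ_nodup _ _)
  · intro j _ p hp
    rw [List.map_filterMap] at hp
    have he : (fun (p : Int × Int) =>
        (if p.2 < (st.length : Int) then some ((p.2, (j : Int)), p.1 + 1) else none).map Prod.fst)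
        = fun p => if p.2 < (st.length : Int) then some ((p.2, (j : Int))) else none := by
      funext p; split_ifs <;> rfl
    rw [he, gaps_keys_snd (f := fun x => (x, (j : Int)))] at hp
    obtain ⟨x, _, hx⟩ := List.mem_map.mp hp
    rw [← hx]
    simp [Int.ofNat_eq_natCast]

lemma downEvents_keys_nodup (st : List (List Int)) : ((downEvents st).map Prod.fst).Nodup := by
  unfold downEvents
  rw [List.map_flatMap]
  refine nodup_tag _ _ Prod.snd ?_ ?_ List.pairwise_lt_range
  · intro j _
    rw [List.map_filterMap]
    have he : (fun (p : Int × Int) =>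
        (if 0 ≤ p.1 then some ((p.1, (j : Int)), p.2 - 1) else none).map Prod.fst)
        = fun p => if 0 ≤ p.1 then some ((p.1, (j : Int))) else none := by
      funext p; split_ifs <;> rfl
    rw [he, gaps_keys_fst (f := fun x => (x, (j : Int)))]
    exact List.Nodup.map (fun a b h => (Prod.mk.injEq _ _ _ _).mp h |>.1) (occ_nodup _ _)
  · intro j _ p hp
    rw [List.map_filterMap] at hp
    have he : (fun (p : Int × Int) =>
        (if 0 ≤ p.1 then some ((p.1, (j : Int)), p.2 - 1) else none).map Prod.fst)
        = fun p => if 0 ≤ p.1 then some ((p.1, (j : Int))) else none := by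
      funext p; split_ifs <;> rfl
    rw [he, gaps_keys_fst (f := fun x => (x, (j : Int)))] at hp
    obtain ⟨x, _, hx⟩ := List.mem_map.mp hp
    rw [← hx]
    simp [Int.ofNat_eq_natCast]

lemma leftEvents_keys_nodup (st : List (List Int)) : ((leftEvents st).map Prod.fst).Nodup := by
  unfold leftEvents
  rw [List.map_flatMap]
  refine nodup_tag _ _ Prod.fst ?_ ?_ List.pairwise_lt_range
  · intro i _
    rw [List.map_filterMap]
    have he : (fun (p : Int × Int) =>
        (if p.2 < ((st.getD i []).length : Int) then some (((i : Int), p.2), p.1 + 1) else none).map Prod.fst)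
        = fun p => if p.2 < ((st.getD i []).length : Int) then some (((i : Int), p.2)) else none := by
      funext p; split_ifs <;> rfl
    rw [he, gaps_keys_snd (f := fun x => ((i : Int), x))]
    exact List.Nodup.map (fun a b h => (Prod.mk.injEq _ _ _ _).mp h |>.2) (occ_nodup _ _)
  · intro i _ p hp
    rw [List.map_filterMap] at hp
    have he : (fun (p : Int × Int) =>
        (if p.2 < ((st.getD i []).length : Int) then some (((i : Int), p.2), p.1 + 1) else none).map Prod.fst)
        = fun p => if p.2 < ((st.getD i []).length : Int) then some (((i : Int), p.2)) else none := by
      funext p; split_ifs <;> rfl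
    rw [he, gaps_keys_snd (f := fun x => ((i : Int), x))] at hp
    obtain ⟨x, _, hx⟩ := List.mem_map.mp hp
    rw [← hx]
    simp [Int.ofNat_eq_natCast]

lemma rightEvents_keys_nodup (st : List (List Int)) : ((rightEvents st).map Prod.fst).Nodup := by
  unfold rightEvents
  rw [List.map_flatMap]
  refine nodup_tag _ _ Prod.fst ?_ ?_ List.pairwise_lt_range
  · intro i _
    rw [List.map_filterMap]
    have he : (fun (p : Int × Int) =>
        (if 0 ≤ p.1 then some (((i : Int), p.1), p.2 - 1) else none).map Prod.fst)
        = fun p => if 0 ≤ p.1 then some (((i : Int), p.1)) else none := by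
      funext p; split_ifs <;> rfl
    rw [he, gaps_keys_fst (f := fun x => ((i : Int), x))]
    exact List.Nodup.map (fun a b h => (Prod.mk.injEq _ _ _ _).mp h |>.2) (occ_nodup _ _)
  · intro i _ p hp
    rw [List.map_filterMap] at hp
    have he : (fun (p : Int × Int) =>
        (if 0 ≤ p.1 then some (((i : Int), p.1), p.2 - 1) else none).map Prod.fst)
        = fun p => if 0 ≤ p.1 then some (((i : Int), p.1)) else none := by
      funext p; split_ifs <;> rfl
    rw [he, gaps_keys_fst (f := fun x => ((i : Int), x))] at hp
    obtain ⟨x, _, hx⟩ := List.mem_map.mp hp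
    rw [← hx]
    simp [Int.ofNat_eq_natCast]

lemma vert_items_up (st : List (List Int)) :
    (vertDictsB st).1.items = upEvents st := by
  have h1 : (vertDictsB st).1
      = (upEvents st).foldl (fun u q => u.insert q.1 q.2) PySem.Dict.empty := by
    unfold vertDictsB upEvents
    rw [foldl_proj_fst _ _
      (fun u j => (gapsB st.length (fun i =>
          decide ((st.getD i []).length ≤ j) || decide ((st.getD i []).getD j 0 ≠ 0))).foldl
        (fun u p => if p.2 < (st.length : Int) then u.insert (p.2, (j : Int)) (p.1 + 1) else u) u)
      (fun s c => foldl_proj_fst _ _ _ (fun s' c' => rfl) s)]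
    rw [foldl_over_flatMap]
    congr 1
    funext u j
    rw [foldl_ite_insert]
  rw [h1]
  rw [PySem.Dict.items_foldl_insert_fresh (k := Prod.fst) (v := Prod.snd)]
  · simp [PySem.Dict.empty]
  · intro a _; simp
  · exact upEvents_keys_nodup st

lemma vert_items_down (st : List (List Int)) :
    (vertDictsB st).2.items = downEvents st := by
  have h1 : (vertDictsB st).2
      = (downEvents st).foldl (fun u q => u.insert q.1 q.2) PySem.Dict.empty := by
    unfold vertDictsB downEvents
    rw [foldl_proj_snd _ _
      (fun u j => (gapsB st.length (fun i =>
          decide ((st.getD i []).length ≤ j) || decide ((st.getD i []).getD j 0 ≠ 0))).foldl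
        (fun u p => if 0 ≤ p.1 then u.insert (p.1, (j : Int)) (p.2 - 1) else u) u)
      (fun s c => foldl_proj_snd _ _ _ (fun s' c' => rfl) s)]
    rw [foldl_over_flatMap]
    congr 1
    funext u j
    rw [foldl_ite_insert]
  rw [h1]
  rw [PySem.Dict.items_foldl_insert_fresh (k := Prod.fst) (v := Prod.snd)]
  · simp [PySem.Dict.empty]
  · intro a _; simp
  · exact downEvents_keys_nodup st

lemma horiz_items_left (st : List (List Int)) :
    (horizDictsB st).1.items = leftEvents st := by
  have h1 : (horizDictsB st).1
      = (leftEvents st).foldl (fun u q => u.insert q.1 q.2) PySem.Dict.empty := by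
    unfold horizDictsB leftEvents
    rw [foldl_proj_fst _ _
      (fun u i => (gapsB (st.getD i []).length
          (fun j => decide ((st.getD i []).getD j 0 ≠ 0))).foldl
        (fun u p => if p.2 < ((st.getD i []).length : Int) then u.insert ((i : Int), p.2) (p.1 + 1) else u) u)
      (fun s c => foldl_proj_fst _ _ _ (fun s' c' => rfl) s)]
    rw [foldl_over_flatMap]
    congr 1
    funext u i
    rw [foldl_ite_insert]
  rw [h1]
  rw [PySem.Dict.items_foldl_insert_fresh (k := Prod.fst) (v := Prod.snd)]
  · simp [PySem.Dict.empty]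
  · intro a _; simp
  · exact leftEvents_keys_nodup st

lemma horiz_items_right (st : List (List Int)) :
    (horizDictsB st).2.items = rightEvents st := by
  have h1 : (horizDictsB st).2
      = (rightEvents st).foldl (fun u q => u.insert q.1 q.2) PySem.Dict.empty := by
    unfold horizDictsB rightEvents
    rw [foldl_proj_snd _ _
      (fun u i => (gapsB (st.getD i []).length
          (fun j => decide ((st.getD i []).getD j 0 ≠ 0))).foldl
        (fun u p => if 0 ≤ p.1 then u.insert ((i : Int), p.1) (p.2 - 1) else u) u)
      (fun s c => foldl_proj_snd _ _ _ (fun s' c' => rfl) s)]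
    rw [foldl_over_flatMap]
    congr 1
    funext u i
    rw [foldl_ite_insert]
  rw [h1]
  rw [PySem.Dict.items_foldl_insert_fresh (k := Prod.fst) (v := Prod.snd)]
  · simp [PySem.Dict.empty]
  · intro a _; simp
  · exact rightEvents_keys_nodup st

-- every row length is bounded by widthB
lemma foldl_width_ge : ∀ (l : List (List Int)) (w : Nat),
    w ≤ l.foldl (fun w r => if w < r.length then r.length else w) w := by
  intro l
  induction l with
  | nil => intro w; simp
  | cons r t ih =>
    intro w
    refine le_trans ?_ (ih (if w < r.length then r.length else w))
    split <;> omega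

lemma width_mem : ∀ (l : List (List Int)) (w : Nat) (r : List Int), r ∈ l →
    r.length ≤ l.foldl (fun w r => if w < r.length then r.length else w) w := by
  intro l
  induction l with
  | nil => intro w r hr; simp at hr
  | cons a t ih =>
    intro w r hr
    rcases List.mem_cons.mp hr with h | h
    · subst h
      refine le_trans ?_ (foldl_width_ge t (if w < r.length then r.length else w))
      split <;> omega
    · exact ih _ r h

lemma widthB_mem (st : List (List Int)) (r : List Int) (hr : r ∈ st) : r.length ≤ widthB st :=
  width_mem st 0 r hr

lemma vert_lookups (st : List (List Int)) (i j : Nat)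
    (hi : i < st.length) (hj : j < (st.getD i []).length)
    (hv : (st.getD i []).getD j 0 ≠ 0) :
    ∃ a b : Int,
      (vertDictsB st).1.getD ((i : Int), (j : Int)) 0 = a + 1 ∧
      (vertDictsB st).2.getD ((i : Int), (j : Int)) 0 = b - 1 ∧
      a < (i : Int) ∧ (i : Int) < b ∧ b ≤ (st.length : Int) ∧
      (a = -1 ∨ (0 ≤ a ∧ a.toNat < st.length ∧
        ((st.getD a.toNat []).length ≤ j ∨ (st.getD a.toNat []).getD j 0 ≠ 0))) ∧
      (b = (st.length : Int) ∨ (0 ≤ b ∧ b.toNat < st.length ∧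
        ((st.getD b.toNat []).length ≤ j ∨ (st.getD b.toNat []).getD j 0 ≠ 0))) ∧
      (∀ m : Nat, a < (m : Int) → (m : Int) < (i : Int) →
        j < (st.getD m []).length ∧ (st.getD m []).getD j 0 = 0) ∧
      (∀ m : Nat, (i : Int) < (m : Int) → (m : Int) < b →
        j < (st.getD m []).length ∧ (st.getD m []).getD j 0 = 0) := by
  have hjw : j < widthB st := by
    refine lt_of_lt_of_le hj (widthB_mem st (st.getD i []) ?_)
    rw [List.getD_eq_getElem st [] hi]
    exact List.getElem_mem hi
  have hPi : (fun m => decide ((st.getD m []).length ≤ j) || decide ((st.getD m []).getD j 0 ≠ 0)) i = true := by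
    simp only [Bool.or_eq_true, decide_eq_true_eq]
    exact Or.inr hv
  obtain ⟨a, b, hma, hmb, hai, hib, hbn, hacl, hbcl, hgap1, hgap2⟩ :=
    gaps_around st.length (fun m => decide ((st.getD m []).length ≤ j) || decide ((st.getD m []).getD j 0 ≠ 0)) i hi hPi
  have hup : (vertDictsB st).1.getD ((i : Int), (j : Int)) 0 = a + 1 := by
    have hmem : (((i : Int), (j : Int)), a + 1) ∈ (vertDictsB st).1.items := by
      rw [vert_items_up]
      unfold upEvents
      refine List.mem_flatMap.mpr ⟨j, List.mem_range.mpr hjw, ?_⟩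
      refine List.mem_filterMap.mpr ⟨(a, (i : Int)), hma, ?_⟩
      rw [if_pos (show ((a, (i : Int)).2 < (st.length : Int)) by simp; exact_mod_cast hi)]
    have hnd : ((vertDictsB st).1.keys).Nodup := by
      show ((vertDictsB st).1.items.map _).Nodup
      rw [vert_items_up]
      exact upEvents_keys_nodup st
    exact PySem.Dict.getD_of_mem_items _ hmem hnd 0
  have hdn : (vertDictsB st).2.getD ((i : Int), (j : Int)) 0 = b - 1 := by
    have hmem : (((i : Int), (j : Int)), b - 1) ∈ (vertDictsB st).2.items := by
      rw [vert_items_down]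
      unfold downEvents
      refine List.mem_flatMap.mpr ⟨j, List.mem_range.mpr hjw, ?_⟩
      refine List.mem_filterMap.mpr ⟨((i : Int), b), hmb, ?_⟩
      rw [if_pos (by omega)]
    have hnd : ((vertDictsB st).2.keys).Nodup := by
      show ((vertDictsB st).2.items.map _).Nodup
      rw [vert_items_down]
      exact downEvents_keys_nodup st
    exact PySem.Dict.getD_of_mem_items _ hmem hnd 0
  refine ⟨a, b, hup, hdn, hai, hib, hbn, ?_, ?_, ?_, ?_⟩
  · rcases hacl with h | ⟨h0, hlt, hP⟩
    · exact Or.inl h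
    · simp only [Bool.or_eq_true, decide_eq_true_eq] at hP
      exact Or.inr ⟨h0, hlt, hP⟩
  · rcases hbcl with h | ⟨h0, hlt, hP⟩
    · exact Or.inl h
    · simp only [Bool.or_eq_true, decide_eq_true_eq] at hP
      exact Or.inr ⟨h0, hlt, hP⟩
  · intro m h1 h2
    have := hgap1 m h1 h2 (by omega)
    simp only [Bool.or_eq_false_iff, decide_eq_false_iff_not] at this
    exact ⟨by omega, by simpa using this.2⟩
  · intro m h1 h2
    have := hgap2 m h1 h2 (by omega)
    simp only [Bool.or_eq_false_iff, decide_eq_false_iff_not] at this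
    exact ⟨by omega, by simpa using this.2⟩

lemma horiz_lookups (st : List (List Int)) (i j : Nat)
    (hi : i < st.length) (hj : j < (st.getD i []).length)
    (hv : (st.getD i []).getD j 0 ≠ 0) :
    ∃ a b : Int,
      (horizDictsB st).1.getD ((i : Int), (j : Int)) 0 = a + 1 ∧
      (horizDictsB st).2.getD ((i : Int), (j : Int)) 0 = b - 1 ∧
      a < (j : Int) ∧ (j : Int) < b ∧ b ≤ ((st.getD i []).length : Int) ∧
      (a = -1 ∨ (0 ≤ a ∧ a.toNat < (st.getD i []).length ∧ (st.getD i []).getD a.toNat 0 ≠ 0)) ∧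
      (b = ((st.getD i []).length : Int) ∨ (0 ≤ b ∧ b.toNat < (st.getD i []).length ∧ (st.getD i []).getD b.toNat 0 ≠ 0)) ∧
      (∀ m : Nat, a < (m : Int) → (m : Int) < (j : Int) → (st.getD i []).getD m 0 = 0) ∧
      (∀ m : Nat, (j : Int) < (m : Int) → (m : Int) < b → (st.getD i []).getD m 0 = 0) := by
  have hPj : (fun m => decide ((st.getD i []).getD m 0 ≠ 0)) j = true := by
    simp only [decide_eq_true_eq]
    exact hv
  obtain ⟨a, b, hma, hmb, hai, hib, hbn, hacl, hbcl, hgap1, hgap2⟩ :=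
    gaps_around (st.getD i []).length (fun m => decide ((st.getD i []).getD m 0 ≠ 0)) j hj hPj
  have hlf : (horizDictsB st).1.getD ((i : Int), (j : Int)) 0 = a + 1 := by
    have hmem : (((i : Int), (j : Int)), a + 1) ∈ (horizDictsB st).1.items := by
      rw [horiz_items_left]
      unfold leftEvents
      refine List.mem_flatMap.mpr ⟨i, List.mem_range.mpr hi, ?_⟩
      refine List.mem_filterMap.mpr ⟨(a, (j : Int)), hma, ?_⟩
      rw [if_pos (show ((a, (j : Int)).2 < (((st.getD i []).length) : Int)) by simp; exact_mod_cast hj)]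
    have hnd : ((horizDictsB st).1.keys).Nodup := by
      show ((horizDictsB st).1.items.map _).Nodup
      rw [horiz_items_left]
      exact leftEvents_keys_nodup st
    exact PySem.Dict.getD_of_mem_items _ hmem hnd 0
  have hrt : (horizDictsB st).2.getD ((i : Int), (j : Int)) 0 = b - 1 := by
    have hmem : (((i : Int), (j : Int)), b - 1) ∈ (horizDictsB st).2.items := by
      rw [horiz_items_right]
      unfold rightEvents
      refine List.mem_flatMap.mpr ⟨i, List.mem_range.mpr hi, ?_⟩
      refine List.mem_filterMap.mpr ⟨((j : Int), b), hmb, ?_⟩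
      rw [if_pos (by omega)]
    have hnd : ((horizDictsB st).2.keys).Nodup := by
      show ((horizDictsB st).2.items.map _).Nodup
      rw [horiz_items_right]
      exact rightEvents_keys_nodup st
    exact PySem.Dict.getD_of_mem_items _ hmem hnd 0
  refine ⟨a, b, hlf, hrt, hai, hib, hbn, ?_, ?_, ?_, ?_⟩
  · rcases hacl with h | ⟨h0, hlt, hP⟩
    · exact Or.inl h
    · simp only [decide_eq_true_eq] at hP
      exact Or.inr ⟨h0, hlt, hP⟩
  · rcases hbcl with h | ⟨h0, hlt, hP⟩
    · exact Or.inl h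
    · simp only [decide_eq_true_eq] at hP
      exact Or.inr ⟨h0, hlt, hP⟩
  · intro m h1 h2
    have := hgap1 m h1 h2 (by omega)
    simpa using this
  · intro m h1 h2
    have := hgap2 m h1 h2 (by omega)
    simpa using this

lemma succ_eq (st : List (List Int)) (i j : Nat) (ni nj : Int)
    (hi : i < st.length) (hj : j < (st.getD i []).length)
    (h0 : 0 ≤ ni) (h1 : ni.toNat < st.length)
    (h2 : 0 ≤ nj) (h3 : nj.toNat < (st.getD ni.toNat []).length) :
    succB st i j ni nj = applyMoveA st [(i : Int), (j : Int), ni, nj] := by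
  unfold succB applyMoveA
  simp only [List.getD_cons_zero, List.getD_cons_succ, Int.toNat_natCast]
  apply List.ext_getElem?
  intro r
  rw [List.getElem?_mapIdx, List.getElem?_modify, List.getElem?_modify]
  by_cases hr : r < st.length
  · rw [List.getElem?_eq_getElem hr]
    show some _ = _
    simp only [Option.map_eq_map, Option.map_some]
    show some _ = some _
    congr 1
    by_cases hir : i = r
    · subst hir
      rw [if_pos rfl]
      by_cases hnr : ni.toNat = i
      · rw [if_pos hnr]
        apply List.ext_getElem
        · simp
        · intro c hc1 hc2
          have hclen : c < st[i].length := by simpa using hc1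
          rw [List.getElem_mapIdx]
          rw [List.getElem_set, List.getElem_set]
          split_ifs <;> first | rfl | omega
      · rw [if_neg hnr]
        apply List.ext_getElem
        · simp
        · intro c hc1 hc2
          rw [List.getElem_mapIdx, List.getElem_set]
          split_ifs <;> first | rfl | omega
    · rw [if_neg hir]
      by_cases hnr : ni.toNat = r
      · rw [if_pos hnr]
        apply List.ext_getElem
        · simp
        · intro c hc1 hc2
          rw [List.getElem_mapIdx, List.getElem_set]
          split_ifs <;> first | rfl | omega
      · rw [if_neg hnr]
        apply List.ext_getElem
        · simp
        · intro c hc1 hc2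
          rw [List.getElem_mapIdx]
          split_ifs <;> first | rfl | omega
  · rw [List.getElem?_eq_none (by omega)]
    rfl

lemma map_if_singleton {α β : Type} (c : Prop) [Decidable c] (f : α → β) (x : α) :
    (if c then [x] else []).map f = if c then [f x] else [] := by
  split_ifs <;> simp

lemma filter_map_four {α β : Type} (q : α → Bool) (f : α → β) (c1 c2 c3 c4 : α) :
    (([c1, c2, c3, c4].filter q).map f)
      = (if q c1 then [f c1] else []) ++ (if q c2 then [f c2] else [])
        ++ (if q c3 then [f c3] else []) ++ (if q c4 then [f c4] else []) := by
  by_cases h1 : q c1 <;> by_cases h2 : q c2 <;> by_cases h3 : q c3 <;> by_cases h4 : q c4 <;>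
    simp [h1, h2, h3, h4]

lemma if_single_congr {α : Type} {c1 : Prop} [Decidable c1] {c2 : Bool}
    (h : c1 ↔ c2 = true) {x y : α} (hxy : c1 → x = y) :
    (if c1 then [x] else []) = (if c2 then [y] else []) := by
  by_cases hc : c1
  · rw [if_pos hc, if_pos (h.mp hc), hxy hc]
  · rw [if_neg hc, if_neg (fun hh => hc (h.mpr hh))]

lemma cell_eq (st : List (List Int)) (hpre : Pre_generate_all_moves st)
    (i j : Nat) (hi : i < st.length) (hj : j < (st.getD i []).length) :
    (cellA st i j).map (applyMoveA st)
      = (if 0 < (st.getD i []).getD j 0 then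
          (([((vertDictsB st).1.getD ((i : Int), (j : Int)) 0, (j : Int)),
             ((vertDictsB st).2.getD ((i : Int), (j : Int)) 0, (j : Int)),
             ((i : Int), (horizDictsB st).1.getD ((i : Int), (j : Int)) 0),
             ((i : Int), (horizDictsB st).2.getD ((i : Int), (j : Int)) 0)].filter
               (fun p => p != ((i : Int), (j : Int)))).map
             (fun p => succB st i j p.1 p.2))
        else []) := by
  by_cases hv : 0 < (st.getD i []).getD j 0
  · have hvne : (st.getD i []).getD j 0 ≠ 0 := by omega
    obtain ⟨a, b, hup, hdn, hai, hib, hbn, hacl, hbcl, hg1, hg2⟩ := vert_lookups st i j hi hj hvne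
    obtain ⟨a', b', hlf, hrt, haj, hjb, hbw, hacl', hbcl', hg1', hg2'⟩ := horiz_lookups st i j hi hj hvne
    have hPre := hpre i (List.mem_range.mpr hi) j (List.mem_range.mpr hj) hv
    have ha0 : -1 ≤ a := by rcases hacl with h | ⟨h0, _⟩ <;> omega
    have hb0 : 0 ≤ b := by omega
    have ha0' : -1 ≤ a' := by rcases hacl' with h | ⟨h0, _⟩ <;> omega
    -- landing rows are long enough (Pre_)
    have hlen1 : ∀ k : Nat, a ≤ (k : Int) → k < i → j < (st.getD k []).length := by
      intro k hk1 hk2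
      apply hPre k (List.mem_range.mpr (by omega))
      left
      refine ⟨hk2, ?_⟩
      intro m hm hkm
      exact hg1 m (by omega) (by exact_mod_cast List.mem_range.mp hm)
    have hlen2 : ∀ k : Nat, (i : Int) < k → (k : Int) ≤ b → k < st.length → j < (st.getD k []).length := by
      intro k hk1 hk2 hk3
      apply hPre k (List.mem_range.mpr hk3)
      right
      refine ⟨by exact_mod_cast hk1, ?_⟩
      intro m hm him
      exact hg2 m (by exact_mod_cast him) (by
        have := List.mem_range.mp hm
        omega)
    have hwup : whileUpA st j i = a := by
      refine whileUp_pair st j i a hai ?_ (fun m h1 h2 => (hg1 m h1 h2).2)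
      rcases hacl with h | ⟨h0, hlt, hco⟩
      · exact Or.inl h
      · right
        refine ⟨h0, ?_⟩
        have hjlen : j < (st.getD a.toNat []).length := hlen1 a.toNat (by omega) (by omega)
        rcases hco with h | h
        · omega
        · exact h
    have hwdn : whileDownA st j (i+1) = b := by
      refine whileDown_pair st j st.length (i+1) (by omega) b (by omega) hbn ?_
        (fun m h1 h2 => (hg2 m (by omega) h2).2)
      rcases hbcl with h | ⟨h0, hlt, hco⟩
      · exact Or.inl h
      · right
        refine ⟨h0, hlt, ?_⟩
        have hjlen : j < (st.getD b.toNat []).length := hlen2 b.toNat (by omega) (by omega) (by omega)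
        rcases hco with h | h
        · omega
        · exact h
    have hwlf : whileLeftA (st.getD i []) j = a' := by
      refine whileLeft_pair (st.getD i []) j a' haj ?_ (fun m h1 h2 => hg1' m h1 h2)
      rcases hacl' with h | ⟨h0, _, hne⟩
      · exact Or.inl h
      · exact Or.inr ⟨h0, hne⟩
    have hwrt : whileRightA (st.getD i []) (j+1) = b' :=
      whileRight_pair (st.getD i []) (st.getD i []).length (j+1) (by omega) b' (by omega) hbw
        hbcl' (fun m h1 h2 => hg2' m (by omega) h2)
    unfold cellA
    rw [if_pos hv, if_pos hv, hwup, hwdn, hwlf, hwrt, hup, hdn, hlf, hrt, filter_map_four]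
    simp only [List.map_append, map_if_singleton]
    have he1 : (if a + 1 ≠ (i : Int) then [applyMoveA st [(i : Int), (j : Int), a + 1, (j : Int)]] else [])
        = (if ((a + 1, (j : Int)) != ((i : Int), (j : Int))) then [succB st i j (a + 1) (j : Int)] else []) := by
      refine if_single_congr (by simp) ?_
      intro hc
      rw [succ_eq st i j (a+1) (j : Int) hi hj (by omega) (by omega)
        (by omega) (by simp only [Int.toNat_natCast]; exact hlen1 (a+1).toNat (by omega) (by omega))]
    have he2 : (if b - 1 ≠ (i : Int) then [applyMoveA st [(i : Int), (j : Int), b - 1, (j : Int)]] else [])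
        = (if ((b - 1, (j : Int)) != ((i : Int), (j : Int))) then [succB st i j (b - 1) (j : Int)] else []) := by
      refine if_single_congr (by simp) ?_
      intro hc
      rw [succ_eq st i j (b-1) (j : Int) hi hj (by omega) (by omega)
        (by omega) (by simp only [Int.toNat_natCast]; exact hlen2 (b-1).toNat (by omega) (by omega) (by omega))]
    have he3 : (if a' + 1 ≠ (j : Int) then [applyMoveA st [(i : Int), (j : Int), (i : Int), a' + 1]] else [])
        = (if (((i : Int), a' + 1) != ((i : Int), (j : Int))) then [succB st i j (i : Int) (a' + 1)] else []) := by
      refine if_single_congr (by simp) ?_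
      intro hc
      rw [succ_eq st i j (i : Int) (a'+1) hi hj (by omega) (by simp only [Int.toNat_natCast]; exact hi)
        (by omega) (by simp only [Int.toNat_natCast]; omega)]
    have he4 : (if b' - 1 ≠ (j : Int) then [applyMoveA st [(i : Int), (j : Int), (i : Int), b' - 1]] else [])
        = (if (((i : Int), b' - 1) != ((i : Int), (j : Int))) then [succB st i j (i : Int) (b' - 1)] else []) := by
      refine if_single_congr (by simp) ?_
      intro hc
      rw [succ_eq st i j (i : Int) (b'-1) hi hj (by omega) (by simp only [Int.toNat_natCast]; exact hi)
        (by omega) (by simp only [Int.toNat_natCast]; omega)]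
    rw [he1, he2, he3, he4]
  · unfold cellA
    rw [if_neg hv, if_neg hv]
    rfl

-- ===== VERDICT (by name: the statement is the Claim_ definition above) =====
theorem generate_all_moves_spec : Claim_equal_generate_all_moves := by
  intro st _ hpre
  unfold Spec_generate_all_moves
  unfold generate_all_moves generate_all_moves_alt
  have hfm : ∀ (l : List Nat) (f g : Nat → List (List (List Int))),
      (∀ x ∈ l, f x = g x) → l.flatMap f = l.flatMap g := by
    intro l f g h
    simp only [List.flatMap_def]
    rw [List.map_congr_left h]
  rw [PySem.List.foldl_append_singleton_eq_map, List.nil_append, find_movesA_flat,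
      List.map_flatMap]
  apply hfm
  intro i hi
  rw [List.map_flatMap]
  apply hfm
  intro j hj
  exact cell_eq st hpre i j (List.mem_range.mp hi) (List.mem_range.mp hj)
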